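-- pv_equiv track=rewrite | github.com/WindsorWZZ/MiniAlphago_for_Reversi | lib/board.py | _calc_flip_half
-- ===== SOURCE A (Python) =====
-- def _calc_flip_half(pos, own, enemy):
--     el = [enemy, enemy & 0x7e7e7e7e7e7e7e7e, enemy & 0x7e7e7e7e7e7e7e7e, enemy & 0x7e7e7e7e7e7e7e7e]
--     masks = [b64(0x0101010101010100 << pos), b64(0x00000000000000fe << pos), b64(0x0002040810204080 << pos), b64(0x8040201008040200 << pos)]
--     flipped = 0
--     for e, mask in zip(el, masks):
--         outflank = mask & ((e | ~mask) + 1) & own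
--         flipped |= (outflank - (outflank != 0)) & mask
--     return flipped
--
-- def b64(x):
--     return x & 0xFFFFFFFFFFFFFFFF
-- ===== SOURCE B (Python) =====
-- # Ray-walk re-implementation: for each of the four half-directions, walk the
-- # squares of the direction mask from pos outward, collecting the run of enemy
-- # discs and flipping it only when the run is bracketed by an own disc.
--
-- EDGE_GUARD = 0x7e7e7e7e7e7e7e7e
--
--
-- def _calc_flip_half(pos, own, enemy):
--     e_side = enemy & EDGE_GUARD
--     flipped = 0
--     for e, mask in ((enemy, b64(0x0101010101010100 << pos)),
--                     (e_side, b64(0x00000000000000fe << pos)),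
--                     (e_side, b64(0x0002040810204080 << pos)),
--                     (e_side, b64(0x8040201008040200 << pos))):
--         cand = 0
--         for v in range(64):
--             b = 1 << v
--             if mask & b == 0:
--                 continue            # not a square of this ray
--             if e & b:
--                 cand |= b           # enemy disc: part of the run, may flip
--             elif own & b:
--                 flipped |= cand     # run bracketed by an own disc: flip it
--                 break
--             else:
--                 break               # empty square: the run is not bracketed
--     return flipped
--
--
-- def b64(x):
--     return x & 0xFFFFFFFFFFFFFFFF
-- ===== Notes on version B (the rewrite author's own statement) =====
-- stated objective: alternative
-- what changed: A computes each direction's flips with a branchless outflank carry trick (mask & ((enemy|~mask)+1) & own); B instead walks the squares of each direction mask explicitly, accumulating the run of enemy discs and flipping it only when the run is bracketed by an own disc; Pre_ restricts to the natural domain (nonnegative square index, disjoint own/enemy bitboards): Python raises ValueError for pos < 0, and on overlapping boards A's returned value is an accidental artefact of the carry arithmetic.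
-- outside the precondition, e.g. on _calc_flip_half(0, 4, 4): A returns 2, B returns 0; on _calc_flip_half(0, -40, 8): A returns 6, B returns 0; on _calc_flip_half(-1, 0, 0): A raises ValueError, B raises ValueError
import Mathlib
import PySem

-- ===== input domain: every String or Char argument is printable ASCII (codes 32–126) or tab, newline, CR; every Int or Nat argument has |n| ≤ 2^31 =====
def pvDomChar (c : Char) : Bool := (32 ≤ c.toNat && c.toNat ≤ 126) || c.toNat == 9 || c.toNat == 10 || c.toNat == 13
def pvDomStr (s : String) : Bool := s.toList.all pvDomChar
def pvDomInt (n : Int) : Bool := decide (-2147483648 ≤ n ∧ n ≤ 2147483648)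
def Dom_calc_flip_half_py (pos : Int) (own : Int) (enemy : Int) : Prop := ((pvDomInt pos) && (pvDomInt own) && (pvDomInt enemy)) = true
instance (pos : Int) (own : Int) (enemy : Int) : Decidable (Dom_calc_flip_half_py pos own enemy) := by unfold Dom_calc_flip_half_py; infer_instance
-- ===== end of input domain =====

-- B replaces A's branchless outflank carry trick by an explicit ray walk over each
-- direction mask's squares (same cost; objective: alternative algorithm).

-- ===== PORT A =====
def pyB64 (x : Int) : Int := PySem.Int.band x 0xFFFFFFFFFFFFFFFF

def calc_flip_half_py (pos : Int) (own : Int) (enemy : Int) : Int :=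
  let el := [enemy, PySem.Int.band enemy 0x7e7e7e7e7e7e7e7e,
             PySem.Int.band enemy 0x7e7e7e7e7e7e7e7e, PySem.Int.band enemy 0x7e7e7e7e7e7e7e7e]
  let masks := [pyB64 ((0x0101010101010100 : Int) <<< pos.toNat),
                pyB64 ((0x00000000000000fe : Int) <<< pos.toNat),
                pyB64 ((0x0002040810204080 : Int) <<< pos.toNat),
                pyB64 ((0x8040201008040200 : Int) <<< pos.toNat)]
  (el.zip masks).foldl
    (fun flipped em =>
      let outflank := PySem.Int.band (PySem.Int.band em.2 (PySem.Int.bor em.1 (Int.not em.2) + 1)) own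
      PySem.Int.bor flipped (PySem.Int.band (outflank - (if outflank ≠ 0 then 1 else 0)) em.2)) 0

-- ===== PORT B =====
-- inner `for v in range(64)` loop of Source B, with its `continue`/`break`s and the
-- candidate-run accumulator `cand`
def altWalk (own e mask : Int) (v : Nat) (cand : Int) : Int :=
  if v < 64 then
    let b : Int := (1 : Int) <<< v
    if PySem.Int.band mask b = 0 then altWalk own e mask (v + 1) cand
    else if PySem.Int.band e b ≠ 0 then altWalk own e mask (v + 1) (PySem.Int.bor cand b)
    else if PySem.Int.band own b ≠ 0 then cand
    else 0
  else 0
termination_by 64 - v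

def calc_flip_half_py_alt (pos : Int) (own : Int) (enemy : Int) : Int :=
  let e_side := PySem.Int.band enemy 0x7e7e7e7e7e7e7e7e
  [(enemy, pyB64 ((0x0101010101010100 : Int) <<< pos.toNat)),
   (e_side, pyB64 ((0x00000000000000fe : Int) <<< pos.toNat)),
   (e_side, pyB64 ((0x0002040810204080 : Int) <<< pos.toNat)),
   (e_side, pyB64 ((0x8040201008040200 : Int) <<< pos.toNat))].foldl
    (fun flipped em => PySem.Int.bor flipped (altWalk own em.1 em.2 0 0)) 0

-- ===== PRECONDITION & SPEC =====
-- the squares of the four half-direction rays from pos (vertical ray, and the three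
-- edge-guarded rays), i.e. every square whose occupancy the flip computation reads
def rayMask (p : Nat) : Nat :=
  ((0x0101010101010100 <<< p) &&& 0xFFFFFFFFFFFFFFFF) |||
  (0x7e7e7e7e7e7e7e7e &&&
    (((0x00000000000000fe <<< p) &&& 0xFFFFFFFFFFFFFFFF) |||
     ((0x0002040810204080 <<< p) &&& 0xFFFFFFFFFFFFFFFF) |||
     ((0x8040201008040200 <<< p) &&& 0xFFFFFFFFFFFFFFFF)))

-- Pre_ restricts to the function's natural domain: pos is a (nonnegative) square index —
-- Python raises ValueError on a negative shift — and own and enemy do not BOTH occupy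
-- any square of the four rays the computation reads; on boards violating this A still
-- returns a value, but it is an accidental artefact of the carry trick (see claim
-- cites), and B's ray walk does the natural thing there instead.
def Pre_calc_flip_half_py (pos : Int) (own : Int) (enemy : Int) : Prop :=
  0 ≤ pos ∧ PySem.Int.band (PySem.Int.band own enemy) (↑(rayMask pos.toNat)) = 0
instance (pos : Int) (own : Int) (enemy : Int) : Decidable (Pre_calc_flip_half_py pos own enemy) := by
  unfold Pre_calc_flip_half_py; infer_instance

def pvWitness_calc_flip_half_py : Int × Int × Int := (2, 262144, 1024)

def Spec_calc_flip_half_py (pos : Int) (own : Int) (enemy : Int) (out : Int) : Prop :=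
  out = calc_flip_half_py_alt pos own enemy
instance (pos : Int) (own : Int) (enemy : Int) (out : Int) : Decidable (Spec_calc_flip_half_py pos own enemy out) := by
  unfold Spec_calc_flip_half_py; infer_instance

-- ===== CLAIM (what is proved, stated in full; the proofs are below) =====
def Claim_equal_calc_flip_half_py : Prop := ∀ (pos : Int) (own : Int) (enemy : Int), Dom_calc_flip_half_py pos own enemy → Pre_calc_flip_half_py pos own enemy → Spec_calc_flip_half_py pos own enemy (calc_flip_half_py pos own enemy)

-- ===== LEMMAS AND PROOFS =====

-- A's per-direction contribution (the body of A's loop), as named helpers for the proofs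
def trickOut (own e mask : Int) : Int :=
  PySem.Int.band (PySem.Int.band mask (PySem.Int.bor e (Int.not mask) + 1)) own

def trickI (own e mask : Int) : Int :=
  PySem.Int.band (trickOut own e mask - (if trickOut own e mask ≠ 0 then 1 else 0)) mask

-- ---- generic Nat bit lemmas ----
lemma mod2_land (a b : Nat) : (a &&& b) % 2 = (a % 2) * (b % 2) := by
  have h := Nat.testBit_land a b 0
  simp only [Nat.testBit_zero] at h
  rcases Nat.mod_two_eq_zero_or_one a with ha | ha <;> rcases Nat.mod_two_eq_zero_or_one b with hb | hb <;>
    rcases Nat.mod_two_eq_zero_or_one (a &&& b) with hc | hc <;> simp [ha, hb, hc] at h ⊢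

lemma mod2_xor (a b : Nat) : (a ^^^ b) % 2 = (a % 2 + b % 2) % 2 := by
  have h := Nat.testBit_xor a b 0
  simp only [Nat.testBit_zero] at h
  rcases Nat.mod_two_eq_zero_or_one a with ha | ha <;> rcases Nat.mod_two_eq_zero_or_one b with hb | hb <;>
    rcases Nat.mod_two_eq_zero_or_one (a ^^^ b) with hc | hc <;> simp [ha, hb, hc] at h ⊢

-- subtracting a bitwise-included part is XOR
lemma sub_and_eq_xor (a : Nat) : ∀ b, a - (a &&& b) = a ^^^ (a &&& b) := by
  induction a using Nat.strong_induction_on with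
  | _ a ih =>
    intro b
    rcases Nat.eq_zero_or_pos a with rfl | hpos
    · simp
    have h2 : a / 2 < a := Nat.div_lt_self hpos (by norm_num)
    have ihb := ih (a / 2) h2 (b / 2)
    have hd : (a &&& b) / 2 = a / 2 &&& b / 2 := Nat.and_div_two
    have hx : (a ^^^ (a &&& b)) / 2 = a / 2 ^^^ (a / 2 &&& b / 2) := by
      rw [Nat.xor_div_two, hd]
    have hm : (a &&& b) % 2 = (a % 2) * (b % 2) := mod2_land a b
    have hxm : (a ^^^ (a &&& b)) % 2 = (a % 2 + (a &&& b) % 2) % 2 := mod2_xor a (a &&& b)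
    have e1 : a = 2 * (a / 2) + a % 2 := by omega
    have e2 : a &&& b = 2 * ((a &&& b) / 2) + (a &&& b) % 2 := by omega
    have e3 : a ^^^ (a &&& b) = 2 * ((a ^^^ (a &&& b)) / 2) + (a ^^^ (a &&& b)) % 2 := by omega
    have hle : (a &&& b) % 2 ≤ a % 2 := by
      rcases Nat.mod_two_eq_zero_or_one b with hb | hb <;> simp [hm, hb]
    have hxm' : (a ^^^ (a &&& b)) % 2 = a % 2 - (a &&& b) % 2 := by
      rcases Nat.mod_two_eq_zero_or_one a with ha | ha <;>
        rcases Nat.mod_two_eq_zero_or_one (a &&& b) with hc | hc <;> rw [hxm] <;> omega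
    have hll : a / 2 &&& b / 2 ≤ a / 2 := Nat.and_le_left
    have hll2 : a &&& b ≤ a := Nat.and_le_left
    omega

-- bits of (y - 1) when bit v is the lowest set bit of y
lemma pred_div_low {y v : Nat} (hv : y.testBit v = true) (hlow : ∀ u, u < v → y.testBit u = false) :
    y % 2 ^ v = 0 ∧ (y / 2 ^ v) % 2 = 1 := by
  constructor
  · apply Nat.eq_of_testBit_eq
    intro i
    rw [Nat.testBit_mod_two_pow, Nat.zero_testBit]
    by_cases hi : i < v
    · rw [hlow i hi]; simp
    · simp [hi]
  · have h := hv
    rw [Nat.testBit_eq_decide_div_mod_eq] at h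
    simpa using h

lemma pred_testBit {y v : Nat} (hv : y.testBit v = true) (hlow : ∀ u, u < v → y.testBit u = false) :
    ∀ u, (y - 1).testBit u = if u < v then true else if u = v then false else y.testBit u := by
  obtain ⟨hmod, hodd⟩ := pred_div_low hv hlow
  set q := y / 2 ^ v with hq
  have hdvd : 2 ^ v ∣ y := Nat.dvd_of_mod_eq_zero hmod
  have hyq : y = 2 ^ v * q := by
    rw [hq, Nat.mul_div_cancel' hdvd]
  have hq1 : 1 ≤ q := by
    rcases Nat.eq_zero_or_pos q with h0 | h1
    · rw [h0] at hodd; simp at hodd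
    · exact h1
  have hA : (0:Nat) < 2 ^ v := Nat.two_pow_pos v
  have hBA : 2 ^ v * (q - 1) = 2 ^ v * q - 2 ^ v := by rw [Nat.mul_sub, Nat.mul_one]
  have hAB : 2 ^ v ≤ 2 ^ v * q := Nat.le_mul_of_pos_right _ (by omega)
  have hy1 : y - 1 = 2 ^ v * (q - 1) + (2 ^ v - 1) := by omega
  intro u
  rw [Nat.testBit_eq_decide_div_mod_eq]
  by_cases h1 : u < v
  · -- (y-1)/2^u = 2^(v-u)*q - 1, an even number minus one
    have hvu : 2 ^ v = 2 ^ u * 2 ^ (v - u) := by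
      rw [← pow_add]; congr 1; omega
    have hAu : (0:Nat) < 2 ^ u := Nat.two_pow_pos u
    have hP : (0:Nat) < 2 ^ (v - u) * q := Nat.mul_pos (Nat.two_pow_pos _) (by omega)
    have h4 : 2 ^ u * (2 ^ (v - u) * q) = y := by rw [hyq, hvu]; ring
    have h3 : 2 ^ u * (2 ^ (v - u) * q - 1) = 2 ^ u * (2 ^ (v - u) * q) - 2 ^ u := by
      rw [Nat.mul_sub, Nat.mul_one]
    have hyp : 2 ^ u ≤ 2 ^ u * (2 ^ (v - u) * q) := Nat.le_mul_of_pos_right _ hP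
    have hsplit : y - 1 = 2 ^ u * (2 ^ (v - u) * q - 1) + (2 ^ u - 1) := by omega
    have hdiv : (y - 1) / 2 ^ u = 2 ^ (v - u) * q - 1 := by
      rw [hsplit, Nat.mul_add_div hAu]
      have : (2 ^ u - 1) / 2 ^ u = 0 := Nat.div_eq_of_lt (by omega)
      omega
    have heven : 2 ^ (v - u) * q = 2 * (2 ^ (v - u - 1) * q) := by
      have h5 : 2 ^ (v - u) = 2 * 2 ^ (v - u - 1) := by
        rw [← pow_succ']; congr 1; omega
      rw [h5]; ring
    simp only [h1, if_true]
    rw [hdiv, heven]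
    have : (2 * (2 ^ (v - u - 1) * q) - 1) % 2 = 1 := by
      have : (0:Nat) < 2 ^ (v - u - 1) * q := Nat.mul_pos (Nat.two_pow_pos _) (by omega)
      omega
    rw [this]; simp
  · by_cases h2 : u = v
    · subst h2
      have hAu : (0:Nat) < 2 ^ u := Nat.two_pow_pos u
      have hdiv : (y - 1) / 2 ^ u = q - 1 := by
        rw [hy1, Nat.mul_add_div hAu]
        have : (2 ^ u - 1) / 2 ^ u = 0 := Nat.div_eq_of_lt (by omega)
        omega
      simp only [h1, if_false]
      rw [hdiv]
      simp
      omega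
    · -- u > v : bits above v agree with y
      have hAv : (0:Nat) < 2 ^ v := Nat.two_pow_pos v
      have hdv : (y - 1) / 2 ^ v = q - 1 := by
        rw [hy1, Nat.mul_add_div hAv]
        have : (2 ^ v - 1) / 2 ^ v = 0 := Nat.div_eq_of_lt (by omega)
        omega
      have hsplitu : 2 ^ u = 2 ^ v * 2 ^ (u - v) := by rw [← pow_add]; congr 1; omega
      have hdu1 : (y - 1) / 2 ^ u = (q - 1) / 2 ^ (u - v) := by
        rw [hsplitu, ← Nat.div_div_eq_div_mul, hdv]
      have hdu2 : y / 2 ^ u = q / 2 ^ (u - v) := by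
        rw [hsplitu, ← Nat.div_div_eq_div_mul, ← hq]
      have hqq : (q - 1) / 2 ^ (u - v) = q / 2 ^ (u - v) := by
        have hs : 1 ≤ u - v := by omega
        have hsp : 2 ^ (u - v) = 2 * 2 ^ (u - v - 1) := by
          rw [← pow_succ']; congr 1; omega
        have hhalf : (q - 1) / 2 = q / 2 := by omega
        rw [hsp, ← Nat.div_div_eq_div_mul, ← Nat.div_div_eq_div_mul, hhalf]
      simp only [h1, if_false, h2, if_false]
      rw [Nat.testBit_eq_decide_div_mod_eq, hdu1, hdu2, hqq]

-- ---- bits of a Python integer (infinite two's complement) ----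
def ibit (a : Int) (u : Nat) : Bool :=
  if 0 ≤ a then a.toNat.testBit u else !((-a - 1).toNat.testBit u)

lemma ibit_of_nonneg {a : Int} (h : 0 ≤ a) (u : Nat) : ibit a u = a.toNat.testBit u := by
  rw [ibit, if_pos h]

lemma ibit_natCast (n : Nat) (u : Nat) : ibit (↑n) u = n.testBit u := by
  rw [ibit_of_nonneg (Int.natCast_nonneg n), Int.toNat_natCast]

lemma ibit_zero (u : Nat) : ibit 0 u = false := by
  rw [ibit, if_pos le_rfl]
  simp

lemma ibit_neg_natCast_sub_one (n : Nat) (u : Nat) : ibit (-(↑n) - 1) u = !(n.testBit u) := by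
  have h : ¬(0 ≤ -(↑n : Int) - 1) := by omega
  rw [ibit, if_neg h]
  have h2 : (-(-(↑n : Int) - 1) - 1).toNat = n := by omega
  rw [h2]

lemma ibit_not (a : Int) (u : Nat) : ibit (Int.not a) u = !(ibit a u) := by
  cases a with
  | ofNat n =>
    have h1 : Int.not (Int.ofNat n) = -(↑n) - 1 := by
      show Int.negSucc n = _
      rw [Int.negSucc_eq]
      ring
    rw [h1, ibit_neg_natCast_sub_one]
    have h2 : (Int.ofNat n) = ((n : Nat) : Int) := rfl
    rw [h2, ibit_natCast]
  | negSucc n =>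
    have h1 : Int.not (Int.negSucc n) = ((n : Nat) : Int) := rfl
    have h2 : Int.negSucc n = -(↑n) - 1 := by rw [Int.negSucc_eq]; ring
    rw [h1, ibit_natCast, h2, ibit_neg_natCast_sub_one, Bool.not_not]

lemma sub_and_testBit (a b u : Nat) : (a - (a &&& b)).testBit u = (a.testBit u && !(b.testBit u)) := by
  rw [sub_and_eq_xor, Nat.testBit_xor, Nat.testBit_land]
  cases a.testBit u <;> cases b.testBit u <;> rfl

lemma ibit_band (a b : Int) (u : Nat) : ibit (PySem.Int.band a b) u = (ibit a u && ibit b u) := by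
  unfold PySem.Int.band
  by_cases h1 : 0 ≤ a <;> by_cases h2 : 0 ≤ b
  · rw [if_pos h1, if_pos h2, ibit_natCast, Nat.testBit_land,
        ibit_of_nonneg h1, ibit_of_nonneg h2]
  · rw [if_pos h1, if_neg h2, ibit_natCast, sub_and_testBit, ibit_of_nonneg h1]
    have hb : b = -(↑((-b - 1).toNat)) - 1 := by omega
    conv_rhs => rw [hb]
    rw [ibit_neg_natCast_sub_one]
  · rw [if_neg h1, if_pos h2, ibit_natCast, sub_and_testBit, ibit_of_nonneg h2]
    have ha : a = -(↑((-a - 1).toNat)) - 1 := by omega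
    conv_rhs => rw [ha]
    rw [ibit_neg_natCast_sub_one]
    cases ((-a - 1).toNat.testBit u) <;> cases (b.toNat.testBit u) <;> rfl
  · rw [if_neg h1, if_neg h2]
    have hres : -(↑((-a - 1).toNat ||| (-b - 1).toNat) : Int) - 1 =
        -(↑((-a - 1).toNat ||| (-b - 1).toNat) : Int) - 1 := rfl
    rw [ibit_neg_natCast_sub_one, Nat.testBit_or]
    have ha : a = -(↑((-a - 1).toNat)) - 1 := by omega
    have hb : b = -(↑((-b - 1).toNat)) - 1 := by omega
    conv_rhs => rw [ha, hb]
    rw [ibit_neg_natCast_sub_one, ibit_neg_natCast_sub_one]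
    cases ((-a - 1).toNat.testBit u) <;> cases ((-b - 1).toNat.testBit u) <;> rfl

lemma band_nonneg_left {a : Int} (b : Int) (h : 0 ≤ a) : 0 ≤ PySem.Int.band a b := by
  unfold PySem.Int.band
  rw [if_pos h]
  by_cases h2 : 0 ≤ b
  · rw [if_pos h2]; exact Int.natCast_nonneg _
  · rw [if_neg h2]; exact Int.natCast_nonneg _

-- the three intermediate Nat values of A's carry computation
def yNat (e : Int) (m : Nat) : Nat := (PySem.Int.band (↑m) (Int.not e)).toNat
def zNat (e : Int) (m : Nat) : Nat := m - (m &&& (yNat e m - 1))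
def outNat (o e : Int) (m : Nat) : Nat := (PySem.Int.band (↑(zNat e m)) o).toNat

lemma yNat_testBit (e : Int) (m : Nat) (u : Nat) :
    (yNat e m).testBit u = (m.testBit u && !(ibit e u)) := by
  unfold yNat
  have hnn : 0 ≤ PySem.Int.band (↑m) (Int.not e) := band_nonneg_left _ (Int.natCast_nonneg m)
  rw [← Int.toNat_natCast ((PySem.Int.band (↑m) (Int.not e)).toNat), Int.toNat_natCast,
      ← ibit_natCast, Int.toNat_of_nonneg hnn, ibit_band, ibit_natCast, ibit_not]

lemma outNat_testBit (o e : Int) (m : Nat) (u : Nat) :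
    (outNat o e m).testBit u = ((zNat e m).testBit u && ibit o u) := by
  unfold outNat
  have hnn : 0 ≤ PySem.Int.band (↑(zNat e m)) o := band_nonneg_left _ (Int.natCast_nonneg _)
  rw [← ibit_natCast, Int.toNat_of_nonneg hnn, ibit_band, ibit_natCast]

-- the carry sum (enemy | ~mask) + 1 is the negated and-not value
lemma band_natCast_negSucc (m n : Nat) :
    PySem.Int.band (↑m) (Int.negSucc n) = ↑(m - (m &&& n)) := by
  unfold PySem.Int.band
  have h1 : ¬((0:Int) ≤ Int.negSucc n) := of_decide_eq_false rfl
  rw [if_pos (Int.natCast_nonneg m), if_neg h1]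
  have h3 : (-(Int.negSucc n) - 1).toNat = n := by
    simp [Int.negSucc_eq]
  rw [h3, Int.toNat_natCast]

lemma bor_nonneg_negSucc (e m : Nat) :
    PySem.Int.bor (↑e) (Int.negSucc m) = -(↑(m - (m &&& e)) : Int) - 1 := by
  unfold PySem.Int.bor
  have h1 : ¬((0:Int) ≤ Int.negSucc m) := of_decide_eq_false rfl
  rw [if_pos (Int.natCast_nonneg e), if_neg h1]
  have h3 : (-(Int.negSucc m) - 1).toNat = m := by
    simp [Int.negSucc_eq]
  rw [h3, Int.toNat_natCast, Nat.land_comm]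

lemma bor_negSucc_negSucc (a b : Nat) :
    PySem.Int.bor (Int.negSucc a) (Int.negSucc b) = -(↑(a &&& b) : Int) - 1 := by
  unfold PySem.Int.bor
  have h1 : ¬((0:Int) ≤ Int.negSucc a) := of_decide_eq_false rfl
  have h2 : ¬((0:Int) ≤ Int.negSucc b) := of_decide_eq_false rfl
  rw [if_neg h1, if_neg h2]
  have h3 : (-(Int.negSucc a) - 1).toNat = a := by simp [Int.negSucc_eq]
  have h4 : (-(Int.negSucc b) - 1).toNat = b := by simp [Int.negSucc_eq]
  rw [h3, h4]

lemma carry_eq (e : Int) (m : Nat) :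
    PySem.Int.bor e (Int.not (↑m)) + 1 = -(↑(yNat e m) : Int) := by
  have hne : Int.not ((↑m : Int)) = Int.negSucc m := rfl
  rw [hne]
  by_cases h2 : 0 ≤ e
  · obtain ⟨n, rfl⟩ := Int.eq_ofNat_of_zero_le h2
    have hy : yNat (↑n) m = m - (m &&& n) := by
      unfold yNat
      have hnot : Int.not ((↑n : Int)) = Int.negSucc n := rfl
      rw [hnot, band_natCast_negSucc, Int.toNat_natCast]
    rw [bor_nonneg_negSucc, hy]
    ring
  · have hrep : e = Int.negSucc ((-e - 1).toNat) := by
      rw [Int.negSucc_eq]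
      omega
    rw [hrep, bor_negSucc_negSucc]
    have hy : yNat (Int.negSucc ((-e - 1).toNat)) m = m &&& ((-e - 1).toNat) := by
      unfold yNat
      have hnot : Int.not (Int.negSucc ((-e - 1).toNat)) = ↑((-e - 1).toNat) := rfl
      rw [hnot, PySem.Int.band_natCast, Int.toNat_natCast]
    rw [hy, Nat.land_comm]
    ring

lemma band_nat_negNat (m y : Nat) (hy : 0 < y) :
    PySem.Int.band (↑m) (-(↑y : Int)) = ↑(m - (m &&& (y - 1))) := by
  unfold PySem.Int.band
  have h1 : (0 : Int) ≤ (↑m : Int) := Int.natCast_nonneg m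
  have h2 : ¬((0:Int) ≤ -(↑y : Int)) := by omega
  rw [if_pos h1, if_neg h2]
  have h3 : (-(-(↑y : Int)) - 1).toNat = y - 1 := by omega
  rw [h3, Int.toNat_natCast]

-- band with a single-bit value
lemma band_shl (a : Int) (v : Nat) :
    PySem.Int.band a ((1 : Int) <<< v) = if ibit a v then ((2 ^ v : Nat) : Int) else 0 := by
  have hb : ((1 : Int) <<< v) = ((2 ^ v : Nat) : Int) := by
    have h1 : ((1 : Int) <<< v) = ((((1 : Nat) <<< v : Nat)) : Int) := rfl
    rw [h1, Nat.one_shiftLeft]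
  rw [hb, PySem.Int.band_comm]
  have hnn : 0 ≤ PySem.Int.band ((2 ^ v : Nat) : Int) a := band_nonneg_left _ (Int.natCast_nonneg _)
  rw [← Int.toNat_of_nonneg hnn]
  have hbit : ∀ u, (PySem.Int.band ((2 ^ v : Nat) : Int) a).toNat.testBit u
      = ((2 ^ v : Nat).testBit u && ibit a u) := by
    intro u
    rw [← ibit_natCast, Int.toNat_of_nonneg hnn, ibit_band, ibit_natCast]
  cases hov : ibit a v
  · simp only [if_neg (by simp : ¬(false = true))]
    have : (PySem.Int.band ((2 ^ v : Nat) : Int) a).toNat = 0 := by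
      apply Nat.eq_of_testBit_eq
      intro u
      rw [hbit u, Nat.zero_testBit, Nat.testBit_two_pow]
      by_cases h : v = u
      · subst h; rw [hov]; simp
      · simp [h]
    rw [this]; rfl
  · have : (PySem.Int.band ((2 ^ v : Nat) : Int) a).toNat = 2 ^ v := by
      apply Nat.eq_of_testBit_eq
      intro u
      rw [hbit u, Nat.testBit_two_pow]
      by_cases h : v = u
      · subst h; rw [hov]; simp
      · simp [h]
    rw [this]
    rfl

lemma band_shl_zero_iff (a : Int) (v : Nat) :
    PySem.Int.band a ((1 : Int) <<< v) = 0 ↔ ibit a v = false := by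
  rw [band_shl]
  cases h : ibit a v
  · simp
  · constructor
    · intro hc
      exfalso
      have h2 : (2 ^ v : Nat) = 0 := by exact_mod_cast hc
      have := Nat.two_pow_pos v
      omega
    · intro hc; cases hc

-- A's loop body, evaluated through the sign cases of band/bor
lemma trickI_cases (o e : Int) (m : Nat) :
    trickI o e (↑m) =
      (if yNat e m = 0 then 0
       else ↑(if outNat o e m = 0 then 0 else (outNat o e m - 1) &&& m) : Int) := by
  unfold trickI trickOut
  rw [carry_eq]
  by_cases hy : yNat e m = 0
  · rw [if_pos hy, hy]
    have h0 : -(((0:Nat):Int)) = 0 := by norm_num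
    rw [h0, PySem.Int.band_zero, PySem.Int.band_comm 0, PySem.Int.band_zero]
    first
      | rfl
      | · have h5 : (0:Int) - (if (0:Int) ≠ 0 then 1 else 0) = 0 := by norm_num
          rw [h5, PySem.Int.band_comm 0, PySem.Int.band_zero]
  · have hpos : 0 < yNat e m := Nat.pos_of_ne_zero hy
    rw [band_nat_negNat m _ hpos, if_neg hy]
    have hout : PySem.Int.band (↑(m - (m &&& (yNat e m - 1)))) o = ↑(outNat o e m) := by
      unfold outNat zNat
      rw [Int.toNat_of_nonneg (band_nonneg_left _ (Int.natCast_nonneg _))]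
    rw [hout]
    by_cases hw0 : outNat o e m = 0
    · rw [if_pos hw0, hw0]
      have h5 : (((0:Nat):Int)) - (if (((0:Nat):Int)) ≠ 0 then 1 else 0) = 0 := by norm_num
      rw [h5, PySem.Int.band_comm 0, PySem.Int.band_zero]
      norm_num
    · have hwi : ((↑(outNat o e m) : Int)) ≠ 0 := by exact_mod_cast hw0
      rw [if_neg hw0, if_pos hwi]
      have hw1 : 1 ≤ outNat o e m := Nat.pos_of_ne_zero hw0
      have hcast : (↑(outNat o e m) : Int) - 1 = ↑(outNat o e m - 1) := by push_cast [hw1]; ring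
      rw [hcast, PySem.Int.band_natCast]

-- the carried-out outflank is the single bracketing square (disjoint boards)
lemma out_single (o e : Int) (m v : Nat)
    (hd : ∀ u, m.testBit u = true → ibit o u = true → ibit e u = true → False)
    (hmv : m.testBit v = true) (hev : ibit e v = false)
    (hlow : ∀ u, u < v → m.testBit u = true → ibit e u = true) :
    outNat o e m = if ibit o v then 2 ^ v else 0 := by
  have hv : (yNat e m).testBit v = true := by rw [yNat_testBit, hmv, hev]; rfl
  have hlow' : ∀ u, u < v → (yNat e m).testBit u = false := by
    intro u hu
    rw [yNat_testBit]
    cases hmu : m.testBit u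
    · rfl
    · rw [hlow u hu hmu]; rfl
  have hp := pred_testBit hv hlow'
  have hz : ∀ u, (zNat e m).testBit u = (m.testBit u && !((yNat e m - 1).testBit u)) := by
    intro u
    unfold zNat
    rw [sub_and_testBit]
  apply Nat.eq_of_testBit_eq
  intro u
  rw [outNat_testBit, hz u, hp u]
  rcases lt_trichotomy u v with h1 | h1 | h1
  · have hrhs : (if ibit o v then 2 ^ v else 0).testBit u = false := by
      cases ibit o v
      · simp [Nat.zero_testBit]
      · simp [Nat.testBit_two_pow]; omega
    rw [hrhs]
    simp only [h1, if_true]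
    cases m.testBit u <;> cases ibit o u <;> rfl
  · subst h1
    simp only [lt_irrefl, if_false]
    cases hb : ibit o u
    · simp [hmv, Nat.zero_testBit]
    · simp [hmv]
  · have hne : ¬(u < v) := by omega
    have hne2 : u ≠ v := by omega
    simp only [hne, if_false, hne2, if_false]
    rw [yNat_testBit]
    have hrhs : (if ibit o v then 2 ^ v else 0).testBit u = false := by
      cases ibit o v
      · simp [Nat.zero_testBit]
      · simp [Nat.testBit_two_pow]; omega
    rw [hrhs]
    cases hmu : m.testBit u <;> cases heu : ibit e u
    · rfl
    · rfl
    · rfl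
    · have hou : ibit o u = false := by
        cases hob : ibit o u
        · rfl
        · exact (hd u hmu hob heu).elim
      rw [hou]
      cases (m.testBit u && !ibit e u) <;> rfl

-- main induction: the ray walk computes A's carry-trick value
lemma walk_eq_trick (o e : Int) (m : Nat) (hm : m < 2 ^ 64)
    (hd : ∀ u, m.testBit u = true → ibit o u = true → ibit e u = true → False) :
    ∀ k v c, k = 64 - v → (∀ u, u < v → m.testBit u = true → ibit e u = true) →
      c = m &&& (2 ^ v - 1) →
      altWalk o e (↑m) v (↑c) = trickI o e (↑m) := by
  intro k
  induction k with
  | zero =>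
    intro v c hk hpre hc
    have hv : ¬(v < 64) := by omega
    rw [altWalk, if_neg hv]
    have hy0 : yNat e m = 0 := by
      apply Nat.eq_of_testBit_eq
      intro u
      rw [yNat_testBit, Nat.zero_testBit]
      cases hmu : m.testBit u
      · rfl
      · have heu : ibit e u = true := by
          by_cases hu64 : u < 64
          · exact hpre u (by omega) hmu
          · exfalso
            have : m < 2 ^ u := lt_of_lt_of_le hm (Nat.pow_le_pow_right (by norm_num) (by omega))
            rw [Nat.testBit_lt_two_pow this] at hmu
            exact absurd hmu (by simp)
        rw [heu]; rfl
    rw [trickI_cases, if_pos hy0]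
  | succ k ih =>
    intro v c hk hpre hc
    have hv : v < 64 := by omega
    rw [altWalk, if_pos hv]
    simp only []
    cases hmb : m.testBit v
    · -- square not on this ray: continue
      rw [if_pos ((band_shl_zero_iff (↑m) v).mpr (by rw [ibit_natCast]; exact hmb))]
      apply ih (v + 1) c (by omega)
      · intro u hu hmu
        rcases Nat.lt_succ_iff_lt_or_eq.mp hu with h | h
        · exact hpre u h hmu
        · subst h; rw [hmu] at hmb; exact absurd hmb (by simp)
      · rw [hc]
        apply Nat.eq_of_testBit_eq
        intro u
        rw [Nat.testBit_land, Nat.testBit_land, Nat.testBit_two_pow_sub_one,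
            Nat.testBit_two_pow_sub_one]
        by_cases h1 : u < v
        · simp [h1]; omega
        · by_cases h2 : u = v
          · subst h2; simp [hmb]
          · have : ¬(u < v + 1) := by omega
            simp [h1, this]
    · have hmb' : PySem.Int.band (↑m) ((1:Int) <<< v) ≠ 0 := by
        intro h
        have h2 := (band_shl_zero_iff (↑m) v).mp h
        rw [ibit_natCast, hmb] at h2
        exact absurd h2 (by simp)
      rw [if_neg hmb']
      cases heb : ibit e v
      · -- first non-enemy square of the ray: the walk stops here
        have hEz : PySem.Int.band e ((1:Int) <<< v) = 0 := (band_shl_zero_iff e v).mpr heb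
        rw [if_neg (not_not_intro hEz)]
        have hy : yNat e m ≠ 0 := by
          intro h0
          have hbit : (yNat e m).testBit v = true := by
            rw [yNat_testBit, hmb, heb]
            rfl
          rw [h0, Nat.zero_testBit] at hbit
          exact absurd hbit (by simp)
        rw [trickI_cases, if_neg hy, out_single o e m v hd hmb heb hpre]
        cases hob : ibit o v
        · have hOz : PySem.Int.band o ((1:Int) <<< v) = 0 := (band_shl_zero_iff o v).mpr hob
          rw [if_neg (not_not_intro hOz)]
          norm_num
        · have hOnz : PySem.Int.band o ((1:Int) <<< v) ≠ 0 := by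
            intro h
            have h2 := (band_shl_zero_iff o v).mp h
            rw [h2] at hob
            exact absurd hob (by simp)
          rw [if_pos hOnz]
          have hpow : (2 : Nat) ^ v ≠ 0 := by positivity
          norm_num [hpow]
          rw [hc, Nat.land_comm]
      · -- enemy disc: extend the candidate run
        have hEnz : PySem.Int.band e ((1:Int) <<< v) ≠ 0 := by
          intro h
          have h2 := (band_shl_zero_iff e v).mp h
          rw [h2] at heb
          exact absurd heb (by simp)
        rw [if_pos hEnz]
        have hbor : PySem.Int.bor (↑c) ((1:Int) <<< v) = ↑(c ||| 2 ^ v) := by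
          have h1 : ((1 : Int) <<< v) = ((((1 : Nat) <<< v : Nat)) : Int) := rfl
          rw [h1, PySem.Int.bor_natCast, Nat.one_shiftLeft]
        rw [hbor]
        apply ih (v + 1) (c ||| 2 ^ v) (by omega)
        · intro u hu hmu
          rcases Nat.lt_succ_iff_lt_or_eq.mp hu with h | h
          · exact hpre u h hmu
          · subst h; exact heb
        · rw [hc]
          apply Nat.eq_of_testBit_eq
          intro u
          rw [Nat.testBit_or, Nat.testBit_land, Nat.testBit_land, Nat.testBit_two_pow_sub_one,
              Nat.testBit_two_pow_sub_one, Nat.testBit_two_pow]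
          by_cases h1 : u < v
          · have h2 : u < v + 1 := by omega
            have h3 : ¬(v = u) := by omega
            simp [h1, h2, h3]
          · by_cases h2 : u = v
            · subst h2
              simp [hmb]
            · have h3 : ¬(u < v + 1) := by omega
              have h4 : ¬(v = u) := by omega
              simp [h1, h3, h4]

-- per-direction equality, stated on the ports' Int values
lemma dir_eq (o e : Int) (m : Nat) (hm : m < 2 ^ 64)
    (hd : ∀ u, m.testBit u = true → ibit o u = true → ibit e u = true → False) :
    altWalk o e (↑m) 0 0 = trickI o e (↑m) := by
  have h0 : ((0 : Nat) : Int) = (0 : Int) := rfl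
  rw [← h0]
  exact walk_eq_trick o e m hm hd 64 0 0 rfl (by omega) (by simp)

lemma lit7e : (0x7e7e7e7e7e7e7e7e : Int) = ((0x7e7e7e7e7e7e7e7e : Nat) : Int) := by norm_num

lemma mask_cast (L : Nat) (p : Nat) :
    pyB64 (((L : Nat) : Int) <<< p) = ↑((L <<< p) &&& 0xFFFFFFFFFFFFFFFF) := by
  unfold pyB64
  have h1 : (((L : Nat) : Int)) <<< p = (((L <<< p : Nat)) : Int) := rfl
  have h2 : (0xFFFFFFFFFFFFFFFF : Int) = ((0xFFFFFFFFFFFFFFFF : Nat) : Int) := by norm_num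
  rw [h1, h2, PySem.Int.band_natCast]

lemma mask_lt (L p : Nat) : (L <<< p) &&& 0xFFFFFFFFFFFFFFFF < 2 ^ 64 := by
  have h := Nat.and_le_right (n := L <<< p) (m := 0xFFFFFFFFFFFFFFFF)
  omega

theorem calc_flip_half_py_spec : Claim_equal_calc_flip_half_py := by
  unfold Claim_equal_calc_flip_half_py
  intro pos own enemy hdom hpre
  obtain ⟨hp, hdisj⟩ := hpre
  unfold Spec_calc_flip_half_py
  -- pointwise form of the ray-disjointness precondition
  have hbits : ∀ u, ibit own u = true → ibit enemy u = true →
      (rayMask pos.toNat).testBit u = true → False := by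
    intro u h1 h2 h3
    have h4 := congrArg (ibit · u) hdisj
    simp only [ibit_band, ibit_natCast, ibit_zero, h1, h2, h3] at h4
    exact absurd h4 (by simp)
  have hes : ∀ u, ibit (PySem.Int.band enemy (0x7e7e7e7e7e7e7e7e : Int)) u =
      (ibit enemy u && (0x7e7e7e7e7e7e7e7e : Nat).testBit u) := by
    intro u
    rw [lit7e, ibit_band, ibit_natCast]
  have hd1 : ∀ u, ((0x0101010101010100 <<< pos.toNat) &&& 0xFFFFFFFFFFFFFFFF).testBit u = true →
      ibit own u = true → ibit enemy u = true → False := by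
    intro u hm ho he
    exact hbits u ho he (by simp only [rayMask, Nat.testBit_or, hm, Bool.true_or])
  have hd2 : ∀ u, ((0x00000000000000fe <<< pos.toNat) &&& 0xFFFFFFFFFFFFFFFF).testBit u = true →
      ibit own u = true → ibit (PySem.Int.band enemy (0x7e7e7e7e7e7e7e7e : Int)) u = true → False := by
    intro u hm ho he
    rw [hes u, Bool.and_eq_true] at he
    exact hbits u ho he.1 (by simp [rayMask, Nat.testBit_or, hm, he.2])
  have hd3 : ∀ u, ((0x0002040810204080 <<< pos.toNat) &&& 0xFFFFFFFFFFFFFFFF).testBit u = true →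
      ibit own u = true → ibit (PySem.Int.band enemy (0x7e7e7e7e7e7e7e7e : Int)) u = true → False := by
    intro u hm ho he
    rw [hes u, Bool.and_eq_true] at he
    exact hbits u ho he.1 (by simp [rayMask, Nat.testBit_or, hm, he.2])
  have hd4 : ∀ u, ((0x8040201008040200 <<< pos.toNat) &&& 0xFFFFFFFFFFFFFFFF).testBit u = true →
      ibit own u = true → ibit (PySem.Int.band enemy (0x7e7e7e7e7e7e7e7e : Int)) u = true → False := by
    intro u hm ho he
    rw [hes u, Bool.and_eq_true] at he
    exact hbits u ho he.1 (by simp [rayMask, Nat.testBit_or, hm, he.2])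
  have hA : calc_flip_half_py pos own enemy =
      PySem.Int.bor (PySem.Int.bor (PySem.Int.bor (PySem.Int.bor 0
        (trickI own enemy (pyB64 ((0x0101010101010100 : Int) <<< pos.toNat))))
        (trickI own (PySem.Int.band enemy 0x7e7e7e7e7e7e7e7e) (pyB64 ((0x00000000000000fe : Int) <<< pos.toNat))))
        (trickI own (PySem.Int.band enemy 0x7e7e7e7e7e7e7e7e) (pyB64 ((0x0002040810204080 : Int) <<< pos.toNat))))
        (trickI own (PySem.Int.band enemy 0x7e7e7e7e7e7e7e7e) (pyB64 ((0x8040201008040200 : Int) <<< pos.toNat))) := rfl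
  have hB : calc_flip_half_py_alt pos own enemy =
      PySem.Int.bor (PySem.Int.bor (PySem.Int.bor (PySem.Int.bor 0
        (altWalk own enemy (pyB64 ((0x0101010101010100 : Int) <<< pos.toNat)) 0 0))
        (altWalk own (PySem.Int.band enemy 0x7e7e7e7e7e7e7e7e) (pyB64 ((0x00000000000000fe : Int) <<< pos.toNat)) 0 0))
        (altWalk own (PySem.Int.band enemy 0x7e7e7e7e7e7e7e7e) (pyB64 ((0x0002040810204080 : Int) <<< pos.toNat)) 0 0))
        (altWalk own (PySem.Int.band enemy 0x7e7e7e7e7e7e7e7e) (pyB64 ((0x8040201008040200 : Int) <<< pos.toNat)) 0 0) := rfl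
  rw [hA, hB]
  have l1 : ((0x0101010101010100 : Int)) = (((0x0101010101010100 : Nat)) : Int) := by norm_num
  have l2 : ((0x00000000000000fe : Int)) = (((0x00000000000000fe : Nat)) : Int) := by norm_num
  have l3 : ((0x0002040810204080 : Int)) = (((0x0002040810204080 : Nat)) : Int) := by norm_num
  have l4 : ((0x8040201008040200 : Int)) = (((0x8040201008040200 : Nat)) : Int) := by norm_num
  rw [l1, l2, l3, l4, mask_cast, mask_cast, mask_cast, mask_cast]
  rw [dir_eq own enemy _ (mask_lt _ _) hd1,
      dir_eq own (PySem.Int.band enemy 0x7e7e7e7e7e7e7e7e) _ (mask_lt _ _) hd2,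
      dir_eq own (PySem.Int.band enemy 0x7e7e7e7e7e7e7e7e) _ (mask_lt _ _) hd3,
      dir_eq own (PySem.Int.band enemy 0x7e7e7e7e7e7e7e7e) _ (mask_lt _ _) hd4]
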